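-- pv_equiv track=rewrite | github.com/genesismatheusdsl/xadrez-python | main.py | movimentos_validos
-- ===== SOURCE A (Python) =====
-- def movimentos_validos(tabuleiro, x, y):
--     """Movimentos válidos para a Rainha: qualquer direção (horizontal, vertical, diagonal)"""
--     movimentos = []
--     for dx in [-1, 1]:
--         for dy in [-1, 1]:
--             for i in range(1, 8):
--                 if 0 <= x + dx * i < 8 and 0 <= y + dy * i < 8:
--                     movimentos.append((x + dx * i, y + dy * i))
--     return movimentos
-- ===== SOURCE B (Python) =====
-- def movimentos_validos(tabuleiro, x, y):
--     """Movimentos válidos para a Rainha: qualquer direção (horizontal, vertical, diagonal)"""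
--     movimentos = []
--     for dx in [-1, 1]:
--         lox, hix = (-x, 7 - x) if dx == 1 else (x - 7, x)
--         for dy in [-1, 1]:
--             loy, hiy = (-y, 7 - y) if dy == 1 else (y - 7, y)
--             lo = max(1, lox, loy)
--             hi = min(7, hix, hiy)
--             for i in range(lo, hi + 1):
--                 movimentos.append((x + dx * i, y + dy * i))
--     return movimentos
-- ===== Notes on version B (the rewrite author's own statement) =====
-- stated objective: alternative
-- what changed: Replaces the per-step in-bounds test over all 7 candidate steps with a closed-form contiguous step interval [lo,hi] per diagonal direction, so the inner loop runs only over the in-bounds steps with no conditional.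
import Mathlib
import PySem

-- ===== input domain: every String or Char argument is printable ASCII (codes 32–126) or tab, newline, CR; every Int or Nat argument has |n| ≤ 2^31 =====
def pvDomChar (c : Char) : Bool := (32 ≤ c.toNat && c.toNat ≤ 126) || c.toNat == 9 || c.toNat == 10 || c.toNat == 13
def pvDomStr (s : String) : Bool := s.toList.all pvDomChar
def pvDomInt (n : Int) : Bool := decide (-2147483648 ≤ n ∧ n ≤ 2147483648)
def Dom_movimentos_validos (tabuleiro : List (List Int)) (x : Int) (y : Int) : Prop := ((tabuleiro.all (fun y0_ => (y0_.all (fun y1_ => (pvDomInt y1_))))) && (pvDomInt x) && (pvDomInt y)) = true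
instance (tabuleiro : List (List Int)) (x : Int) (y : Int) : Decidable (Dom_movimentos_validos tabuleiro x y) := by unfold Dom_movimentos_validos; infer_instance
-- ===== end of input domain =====

-- B replaces A's per-step bounds test with a closed-form contiguous step interval per diagonal direction (alternative decomposition, same output order).


-- ===== PORT A =====
def movimentos_validos (tabuleiro : List (List Int)) (x : Int) (y : Int) : List (Int × Int) :=
  [(-1 : Int), 1].foldl (fun movimentos dx =>
    [(-1 : Int), 1].foldl (fun movimentos dy =>
      (PySem.List.pyRange 1 8 1).foldl (fun movimentos i =>
        if 0 ≤ x + dx * i ∧ x + dx * i < 8 ∧ 0 ≤ y + dy * i ∧ y + dy * i < 8 then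
          movimentos ++ [(x + dx * i, y + dy * i)]
        else movimentos) movimentos) movimentos) []

-- ===== PORT B =====
def movimentos_validos_alt (tabuleiro : List (List Int)) (x : Int) (y : Int) : List (Int × Int) :=
  [(-1 : Int), 1].foldl (fun movimentos dx =>
    let lox : Int := if dx = 1 then -x else x - 7
    let hix : Int := if dx = 1 then 7 - x else x
    [(-1 : Int), 1].foldl (fun movimentos dy =>
      let loy : Int := if dy = 1 then -y else y - 7
      let hiy : Int := if dy = 1 then 7 - y else y
      let lo : Int := max (max 1 lox) loy
      let hi : Int := min (min 7 hix) hiy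
      movimentos ++ (PySem.List.pyRange lo (hi + 1) 1).map (fun i => (x + dx * i, y + dy * i)))
      movimentos) []

-- ===== PRECONDITION & SPEC =====
def Spec_movimentos_validos (tabuleiro : List (List Int)) (x : Int) (y : Int) (out : List (Int × Int)) : Prop := out = movimentos_validos_alt tabuleiro x y
instance (tabuleiro : List (List Int)) (x : Int) (y : Int) (out : List (Int × Int)) : Decidable (Spec_movimentos_validos tabuleiro x y out) := by unfold Spec_movimentos_validos; infer_instance

-- ===== CLAIM (what is proved, stated in full; the proofs are below) =====
def Claim_equal_movimentos_validos : Prop := ∀ (tabuleiro : List (List Int)) (x : Int) (y : Int), Dom_movimentos_validos tabuleiro x y → Spec_movimentos_validos tabuleiro x y (movimentos_validos tabuleiro x y)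

-- ===== LEMMAS AND PROOFS =====

-- filtering [1..7] by a clamped interval is exactly the Python range(lo, hi+1)
lemma filter_17 (lo hi : Int) (h1 : 1 ≤ lo) (h7 : hi ≤ 7) :
    (PySem.List.pyRange 1 8 1).filter (fun i => decide (lo ≤ i ∧ i ≤ hi)) =
      PySem.List.pyRange lo (hi + 1) 1 := by
  by_cases h : lo ≤ hi
  · have hlo7 : lo ≤ 7 := le_trans h h7
    have hhi1 : 1 ≤ hi := le_trans h1 h
    interval_cases lo <;> interval_cases hi <;> decide
  · have he : PySem.List.pyRange lo (hi + 1) 1 = [] :=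
      PySem.List.pyRange_one_eq_nil (by omega)
    rw [he, List.filter_eq_nil_iff]
    intro i _
    simp only [decide_eq_true_eq]
    omega

-- A's inner step loop for one direction equals B's closed-form segment
lemma seg (x y dx dy lo hi : Int) (h1 : 1 ≤ lo) (h7 : hi ≤ 7)
    (hc : ∀ i : Int, 1 ≤ i → i < 8 →
      ((0 ≤ x + dx * i ∧ x + dx * i < 8 ∧ 0 ≤ y + dy * i ∧ y + dy * i < 8) ↔ (lo ≤ i ∧ i ≤ hi)))
    (acc : List (Int × Int)) :
    (PySem.List.pyRange 1 8 1).foldl (fun movimentos i =>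
        if 0 ≤ x + dx * i ∧ x + dx * i < 8 ∧ 0 ≤ y + dy * i ∧ y + dy * i < 8 then
          movimentos ++ [(x + dx * i, y + dy * i)]
        else movimentos) acc
      = acc ++ (PySem.List.pyRange lo (hi + 1) 1).map (fun i => (x + dx * i, y + dy * i)) := by
  rw [PySem.List.foldl_append_ite]
  have hf : (PySem.List.pyRange 1 8 1).filter
        (fun i => decide (0 ≤ x + dx * i ∧ x + dx * i < 8 ∧ 0 ≤ y + dy * i ∧ y + dy * i < 8))
      = (PySem.List.pyRange 1 8 1).filter (fun i => decide (lo ≤ i ∧ i ≤ hi)) := by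
    apply List.filter_congr
    intro i him
    have hm := PySem.List.mem_pyRange_one.mp him
    simp only [decide_eq_decide]
    exact hc i hm.1 hm.2
  rw [hf, filter_17 lo hi h1 h7]

-- ===== VERDICT (by name: the statement is the Claim_ definition above) =====
theorem movimentos_validos_spec : Claim_equal_movimentos_validos := by
  intro tabuleiro x y _
  unfold Spec_movimentos_validos movimentos_validos movimentos_validos_alt
  simp only [List.foldl]
  rw [seg x y (-1) (-1) (max (max 1 (x - 7)) (y - 7)) (min (min 7 x) y)
        (by omega) (by omega) (by intro i _ _; omega),
      seg x y (-1) 1 (max (max 1 (x - 7)) (-y)) (min (min 7 x) (7 - y))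
        (by omega) (by omega) (by intro i _ _; omega),
      seg x y 1 (-1) (max (max 1 (-x)) (y - 7)) (min (min 7 (7 - x)) y)
        (by omega) (by omega) (by intro i _ _; omega),
      seg x y 1 1 (max (max 1 (-x)) (-y)) (min (min 7 (7 - x)) (7 - y))
        (by omega) (by omega) (by intro i _ _; omega)]
  norm_num
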